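-- pv_equiv track=rewrite | github.com/engple/engple.github.io | scripts/engple/core/context_detector.py | is_html_context
-- ===== SOURCE A (Python) =====
-- def is_html_context(text: str, position: int) -> bool:
--     """Check if position is inside HTML tags requiring <a href> format."""
--     before_text = text[:position]
--
--     # Check for common HTML tags
--     html_tags = ["<span", "<div", "<p", "<li", "<td", "<th"]
--
--     for tag in html_tags:
--         last_open = before_text.rfind(tag)
--         if last_open != -1:
--             tag_name = tag[1:]  # Remove '<'
--             close_tag = f"</{tag_name}>"
--             last_close = before_text.rfind(close_tag)
--             if last_open > last_close:
--                 return True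
--
--     return False
-- ===== SOURCE B (Python) =====
-- def _open_at_end(before, op, cl):
--     """Forward state-machine scan: last match wins; open sets, close clears."""
--     state = False
--     for i in range(len(before)):
--         if before.startswith(op, i):
--             state = True
--         elif before.startswith(cl, i):
--             state = False
--     return state
--
--
-- def is_html_context(text: str, position: int) -> bool:
--     before = text[:position]
--     pairs = [("<span", "</span>"), ("<div", "</div>"), ("<p", "</p>"),
--              ("<li", "</li>"), ("<td", "</td>"), ("<th", "</th>")]
--     return any(_open_at_end(before, op, cl) for op, cl in pairs)
-- ===== Notes on version B (the rewrite author's own statement) =====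
-- stated objective: alternative
-- what changed: Replaces the twelve backward rfind scans with one forward state-machine scan per tag pair: an occurrence of the opening substring sets an open flag and an occurrence of the closing substring clears it, so the final flag equals 'last open after last close' with no index arithmetic or -1 sentinels.
import Mathlib
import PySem

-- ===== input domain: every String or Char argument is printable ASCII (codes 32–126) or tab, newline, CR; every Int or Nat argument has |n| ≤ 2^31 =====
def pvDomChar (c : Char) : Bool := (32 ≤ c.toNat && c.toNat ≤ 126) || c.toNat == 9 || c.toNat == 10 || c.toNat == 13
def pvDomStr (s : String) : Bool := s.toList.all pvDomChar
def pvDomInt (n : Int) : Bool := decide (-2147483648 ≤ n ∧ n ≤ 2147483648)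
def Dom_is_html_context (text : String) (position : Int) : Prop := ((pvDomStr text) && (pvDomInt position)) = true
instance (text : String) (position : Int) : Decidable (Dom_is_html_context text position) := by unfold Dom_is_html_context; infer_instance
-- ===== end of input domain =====

-- B replaces A's twelve rfind scans by one forward state-machine scan per tag pair
-- (open-substring sets, close-substring clears; last match wins): alternative decomposition, same cost.


-- ===== PORT A =====
-- f"</{tag_name}>" with tag_name = tag[1:]
def aClose (tag : List Char) : List Char :=
  ['<', '/'] ++ PySem.List.slice tag (some 1) none ++ ['>']

-- the 'for tag in html_tags' loop with its early returns
def aLoop (before : List Char) : List (List Char) → Bool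
  | [] => false
  | tag :: rest =>
    let lastOpen := PySem.Chars.rfind before tag
    if lastOpen ≠ -1 then
      let lastClose := PySem.Chars.rfind before (aClose tag)
      if lastOpen > lastClose then true else aLoop before rest
    else aLoop before rest

def is_html_context (text : String) (position : Int) : Bool :=
  let before := PySem.Chars.slice text.toList none (some position)
  aLoop before [['<','s','p','a','n'], ['<','d','i','v'], ['<','p'], ['<','l','i'], ['<','t','d'], ['<','t','h']]

-- ===== PORT B =====
-- _open_at_end: before.startswith(sub, i) is exactly sub.isPrefixOf (before.drop i) for 0 ≤ i < len(before)
def bScan (before op cl : List Char) : Bool :=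
  (List.range before.length).foldl
    (fun st i =>
      if op.isPrefixOf (before.drop i) then true
      else if cl.isPrefixOf (before.drop i) then false
      else st) false

def is_html_context_alt (text : String) (position : Int) : Bool :=
  let before := PySem.Chars.slice text.toList none (some position)
  [(['<','s','p','a','n'], ['<','/','s','p','a','n','>']),
   (['<','d','i','v'], ['<','/','d','i','v','>']),
   (['<','p'], ['<','/','p','>']),
   (['<','l','i'], ['<','/','l','i','>']),
   (['<','t','d'], ['<','/','t','d','>']),
   (['<','t','h'], ['<','/','t','h','>'])].any
    (fun pr => bScan before pr.1 pr.2)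

-- ===== PRECONDITION & SPEC =====
def Spec_is_html_context (text : String) (position : Int) (out : Bool) : Prop := out = is_html_context_alt text position
instance (text : String) (position : Int) (out : Bool) : Decidable (Spec_is_html_context text position out) := by unfold Spec_is_html_context; infer_instance

-- ===== CLAIM (what is proved, stated in full; the proofs are below) =====
def Claim_equal_is_html_context : Prop := ∀ (text : String) (position : Int), Dom_is_html_context text position → Spec_is_html_context text position (is_html_context text position)

-- ===== LEMMAS AND PROOFS =====

theorem go_zero (s sub : List Char) :
    PySem.Chars.rfind.go s sub 0 = if sub.isPrefixOf s then 0 else -1 := by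
  simp [PySem.Chars.rfind.go]

theorem go_succ (s sub : List Char) (j : Nat) :
    PySem.Chars.rfind.go s sub (j+1) =
      if sub.isPrefixOf (s.drop (j+1)) then ((j : Int)+1) else PySem.Chars.rfind.go s sub j := by
  rw [PySem.Chars.rfind.go]
  push_cast
  rfl

theorem go_le (s sub : List Char) (k : Nat) : PySem.Chars.rfind.go s sub k ≤ (k : Int) := by
  induction k with
  | zero => rw [go_zero]; split <;> omega
  | succ j ih => rw [go_succ]; split <;> omega

theorem neg_one_le_go (s sub : List Char) (k : Nat) : -1 ≤ PySem.Chars.rfind.go s sub k := by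
  induction k with
  | zero => rw [go_zero]; split <;> omega
  | succ j ih => rw [go_succ]; split <;> omega

-- an open tag '<x…' and a close tag '</…' can never start at the same position
theorem disj_prefix {b c : Char} (a : Char) (u v t : List Char) (h : b ≠ c) :
    ¬((a::b::u).isPrefixOf t = true ∧ (a::c::v).isPrefixOf t = true) := by
  rintro ⟨h1, h2⟩
  match t with
  | [] => simp [List.isPrefixOf] at h1
  | [x] => simp [List.isPrefixOf] at h1
  | x :: y :: ts =>
    simp [List.isPrefixOf] at h1 h2
    exact h (h1.2.1.trans h2.2.1.symm)

-- partial scan of B, first k indices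
def scanK (before op cl : List Char) (k : Nat) : Bool :=
  (List.range k).foldl
    (fun st i =>
      if op.isPrefixOf (before.drop i) then true
      else if cl.isPrefixOf (before.drop i) then false
      else st) false

theorem scanK_succ (before op cl : List Char) (k : Nat) :
    scanK before op cl (k+1) =
      (if op.isPrefixOf (before.drop k) then true
       else if cl.isPrefixOf (before.drop k) then false
       else scanK before op cl k) := by
  simp [scanK, List.range_succ]

theorem scanK_go (before op cl : List Char)
    (hd : ∀ j : Nat, ¬(op.isPrefixOf (before.drop j) = true ∧ cl.isPrefixOf (before.drop j) = true)) :
    ∀ k : Nat, scanK before op cl (k+1) =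
      decide (PySem.Chars.rfind.go before op k > PySem.Chars.rfind.go before cl k) := by
  intro k
  induction k with
  | zero =>
    rw [scanK_succ, go_zero, go_zero]
    have h0 := hd 0
    simp only [List.drop_zero] at *
    by_cases ho : op.isPrefixOf before
    · have hc : cl.isPrefixOf before = false := by
        by_contra hcc
        exact h0 ⟨ho, by simpa using hcc⟩
      simp [ho, hc]
    · by_cases hc : cl.isPrefixOf before <;> simp [ho, hc, scanK]
  | succ j ih =>
    rw [scanK_succ, go_succ, go_succ]
    by_cases ho : op.isPrefixOf (before.drop (j+1))
    · have hc : cl.isPrefixOf (before.drop (j+1)) = false := by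
        by_contra hcc
        exact hd (j+1) ⟨ho, by simpa using hcc⟩
      have := go_le before cl j
      simp only [ho, hc, if_true]
      have : PySem.Chars.rfind.go before cl j < (j:Int)+1 := by
        have := go_le before cl j; omega
      simp [this]
    · by_cases hc : cl.isPrefixOf (before.drop (j+1))
      · have := go_le before op j
        simp only [ho, hc, if_true]
        have h2 : ¬ (PySem.Chars.rfind.go before op j > (j:Int)+1) := by omega
        simp [h2]
      · simp [ho, hc, ih]

theorem isPrefixOf_nil_of_ne {sub : List Char} (h : sub ≠ []) :
    sub.isPrefixOf ([] : List Char) = false := by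
  cases sub with
  | nil => exact absurd rfl h
  | cons a l => rfl

theorem bScan_eq (before op cl : List Char) (hop : op ≠ []) (hcl : cl ≠ [])
    (hd : ∀ j : Nat, ¬(op.isPrefixOf (before.drop j) = true ∧ cl.isPrefixOf (before.drop j) = true)) :
    bScan before op cl = decide (PySem.Chars.rfind before op > PySem.Chars.rfind before cl) := by
  cases hb : before.length with
  | zero =>
    have hnil : before = [] := List.length_eq_zero_iff.mp hb
    subst hnil
    simp [bScan, PySem.Chars.rfind, go_zero, isPrefixOf_nil_of_ne hop, isPrefixOf_nil_of_ne hcl]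
  | succ m =>
    have hdrop : before.drop (m+1) = [] := by
      apply List.drop_eq_nil_of_le; omega
    have hstep : ∀ sub : List Char, sub ≠ [] →
        PySem.Chars.rfind before sub = PySem.Chars.rfind.go before sub m := by
      intro sub hs
      unfold PySem.Chars.rfind
      rw [hb, go_succ, hdrop, isPrefixOf_nil_of_ne hs]
      simp
    have hscan : bScan before op cl = scanK before op cl (m+1) := by
      simp [bScan, scanK, hb]
    rw [hscan, scanK_go before op cl hd m, hstep op hop, hstep cl hcl]

theorem aLoop_cons (b tag : List Char) (rest : List (List Char)) :
    aLoop b (tag :: rest) =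
      ((decide (PySem.Chars.rfind b tag > PySem.Chars.rfind b (aClose tag))) || aLoop b rest) := by
  show (if PySem.Chars.rfind b tag ≠ -1 then
          if PySem.Chars.rfind b tag > PySem.Chars.rfind b (aClose tag) then true else aLoop b rest
        else aLoop b rest) = _
  by_cases h : PySem.Chars.rfind b tag ≠ -1
  · rw [if_pos h]
    by_cases h2 : PySem.Chars.rfind b tag > PySem.Chars.rfind b (aClose tag) <;> simp [h2]
  · rw [if_neg h]
    have hm1 : PySem.Chars.rfind b tag = -1 := by omega
    have hge : -1 ≤ PySem.Chars.rfind b (aClose tag) := by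
      unfold PySem.Chars.rfind; exact neg_one_le_go _ _ _
    have h2 : ¬ PySem.Chars.rfind b tag > PySem.Chars.rfind b (aClose tag) := by omega
    simp [h2]

theorem main_eq (text : String) (position : Int) :
    is_html_context text position = is_html_context_alt text position := by
  unfold is_html_context is_html_context_alt
  set b := PySem.Chars.slice text.toList none (some position) with hbdef
  have e : ∀ (op cl : List Char), op ≠ [] → cl ≠ [] →
      (∀ j : Nat, ¬(op.isPrefixOf (b.drop j) = true ∧ cl.isPrefixOf (b.drop j) = true)) →
      cl = aClose op →
      bScan b op cl = decide (PySem.Chars.rfind b op > PySem.Chars.rfind b (aClose op)) := by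
    intro op cl hop hcl hd hc
    rw [← hc]; exact bScan_eq b op cl hop hcl hd
  simp only [List.any_cons, List.any_nil]
  rw [e ['<','s','p','a','n'] ['<','/','s','p','a','n','>'] (by decide) (by decide)
        (fun j => disj_prefix '<' _ _ _ (by decide)) (by decide),
     e ['<','d','i','v'] ['<','/','d','i','v','>'] (by decide) (by decide)
        (fun j => disj_prefix '<' _ _ _ (by decide)) (by decide),
     e ['<','p'] ['<','/','p','>'] (by decide) (by decide)
        (fun j => disj_prefix '<' _ _ _ (by decide)) (by decide),
     e ['<','l','i'] ['<','/','l','i','>'] (by decide) (by decide)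
        (fun j => disj_prefix '<' _ _ _ (by decide)) (by decide),
     e ['<','t','d'] ['<','/','t','d','>'] (by decide) (by decide)
        (fun j => disj_prefix '<' _ _ _ (by decide)) (by decide),
     e ['<','t','h'] ['<','/','t','h','>'] (by decide) (by decide)
        (fun j => disj_prefix '<' _ _ _ (by decide)) (by decide)]
  rw [aLoop_cons, aLoop_cons, aLoop_cons, aLoop_cons, aLoop_cons, aLoop_cons]
  simp [aLoop]

-- ===== VERDICT (by name: the statement is the Claim_ definition above) =====
theorem is_html_context_spec : Claim_equal_is_html_context := by
  intro text position _
  unfold Spec_is_html_context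
  exact main_eq text position
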